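-- pv_equiv track=rewrite | github.com/harshvardhan579/GrokkingTheCodingInterview | wordConcatenation.py | find_word_concatenation
-- ===== SOURCE A (Python) =====
-- def find_word_concatenation(str1, words):
--   result_indices = []
--   # TODO: Write your code here
--   if len(words) == 0 or len(words[0]) == 0:
--     return []
--
--   wordFreq = {}
--
--   for word in words:
--     if word not in wordFreq:
--       wordFreq[word] = 0
--     wordFreq[word] += 1
--
--   wordCount = len(words)
--   wordLength = len(words[0])
--
--   for i in range((len(str1) - wordCount * wordLength)+1):
--     wordSeen = {}
--     for j in range(0, wordCount):
--       nextWordIndex = i + j * wordLength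
--       word = str1[nextWordIndex: nextWordIndex + wordLength]
--       if word not in wordFreq:
--         break
--
--       if word not in wordSeen:
--         wordSeen[word] = 0
--       wordSeen[word] += 1
--
--       if wordSeen[word] > wordFreq.get(word, 0):
--         break
--
--       if j + 1 == wordCount:
--         result_indices.append(i)
--
--
--   return result_indices
-- ===== SOURCE B (Python) =====
-- def find_word_concatenation(str1, words):
--   if len(words) == 0 or len(words[0]) == 0:
--     return []
--   word_count = len(words)
--   word_length = len(words[0])
--   span = word_count * word_length
--   target = sorted(words)
--   result_indices = []
--   for i in range(len(str1) - span + 1):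
--     window = sorted(str1[i + j * word_length: i + (j + 1) * word_length] for j in range(word_count))
--     if window == target:
--       result_indices.append(i)
--   return result_indices
-- ===== Notes on version B (the rewrite author's own statement) =====
-- stated objective: alternative
-- what changed: Replaces A's per-window incremental seen-counter dict with early breaks by a sort-and-compare check: words are sorted once and each window's word-length slices are sorted and compared to that target list.
import Mathlib
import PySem

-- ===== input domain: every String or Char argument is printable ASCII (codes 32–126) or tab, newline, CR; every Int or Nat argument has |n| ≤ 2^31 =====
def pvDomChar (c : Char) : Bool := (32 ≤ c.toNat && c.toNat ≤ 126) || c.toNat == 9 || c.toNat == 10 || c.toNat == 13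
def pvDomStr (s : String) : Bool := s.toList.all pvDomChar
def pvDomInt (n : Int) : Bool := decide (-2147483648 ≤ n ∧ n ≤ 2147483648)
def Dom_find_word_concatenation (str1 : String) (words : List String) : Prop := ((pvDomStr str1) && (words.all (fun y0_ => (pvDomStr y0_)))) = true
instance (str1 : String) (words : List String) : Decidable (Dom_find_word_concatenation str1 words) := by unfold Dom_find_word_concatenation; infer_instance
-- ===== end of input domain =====

-- B replaces A's per-window seen-counter dict with early breaks by sorting words once and
-- comparing each window's sorted list of slices against it (objective: alternative).

-- ===== PORT A =====
-- A's inner 'for j in range(0, wordCount)' loop, with its two breaks and the append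
def fwcInner (str1 : String) (freq : PySem.Dict String Int) (wordCount wordLength i : Int)
    (j rem : Nat) (seen : PySem.Dict String Int) (acc : List Int) : List Int :=
  match rem with
  | 0 => acc
  | rem' + 1 =>
    let nextWordIndex : Int := i + (j : Int) * wordLength
    let word := PySem.Str.slice str1 (some nextWordIndex) (some (nextWordIndex + wordLength))
    if freq.contains word = false then acc              -- if word not in wordFreq: break
    else
      let seen1 := if seen.contains word = false then seen.insert word 0 else seen
      let seen2 := seen1.modify word 0 (· + 1)          -- wordSeen[word] += 1
      if seen2.getD word 0 > freq.getD word 0 then acc  -- break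
      else
        let acc1 := if ((j : Int) + 1) == wordCount then acc ++ [i] else acc
        fwcInner str1 freq wordCount wordLength i (j + 1) rem' seen2 acc1

def find_word_concatenation (str1 : String) (words : List String) : List Int :=
  if words.length == 0 || PySem.Str.len (words.headD "") == 0 then []
  else
    let wordFreq := words.foldl (fun d word =>
      (if d.contains word = false then d.insert word 0 else d).modify word 0 (· + 1))
      PySem.Dict.empty
    let wordCount : Int := words.length
    let wordLength : Int := PySem.Str.len (words.headD "")
    (PySem.List.pyRange 0 (PySem.Str.len str1 - wordCount * wordLength + 1) 1).foldl
      (fun acc i => fwcInner str1 wordFreq wordCount wordLength i 0 words.length PySem.Dict.empty acc) []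

-- ===== PORT B =====
def find_word_concatenation_alt (str1 : String) (words : List String) : List Int :=
  if words.length == 0 || PySem.Str.len (words.headD "") == 0 then []
  else
    let wordCount : Int := words.length
    let wordLength : Int := PySem.Str.len (words.headD "")
    let span := wordCount * wordLength
    let target := PySem.List.sorted words (fun x => x) false
    (PySem.List.pyRange 0 (PySem.Str.len str1 - span + 1) 1).foldl
      (fun acc i =>
        let window := PySem.List.sorted
          ((PySem.List.pyRange 0 wordCount 1).map (fun j =>
            PySem.Str.slice str1 (some (i + j * wordLength)) (some (i + (j + 1) * wordLength))))
          (fun x => x) false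
        if window == target then acc ++ [i] else acc) []

-- ===== PRECONDITION & SPEC =====
def Spec_find_word_concatenation (str1 : String) (words : List String) (out : List Int) : Prop := out = find_word_concatenation_alt str1 words
instance (str1 : String) (words : List String) (out : List Int) : Decidable (Spec_find_word_concatenation str1 words out) := by unfold Spec_find_word_concatenation; infer_instance

-- ===== CLAIM (what is proved, stated in full; the proofs are below) =====
def Claim_equal_find_word_concatenation : Prop := ∀ (str1 : String) (words : List String), Dom_find_word_concatenation str1 words → Spec_find_word_concatenation str1 words (find_word_concatenation str1 words)

-- ===== LEMMAS AND PROOFS =====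

-- the wordCount slices of length wordLength of str1 starting at i (A's window = B's window)
def fwcSlices (str1 : String) (wl i : Int) (k : Nat) : List String :=
  (List.range k).map (fun (j : Nat) => PySem.Str.slice str1 (some (i + (j : Int) * wl)) (some (i + (j : Int) * wl + wl)))

-- one 'if word not in d: d[word] = 0; d[word] += 1' step, seen through getD
lemma fwcStep_getD (d : PySem.Dict String Int) (x w : String) :
    ((if d.contains x = false then d.insert x 0 else d).modify x 0 (· + 1)).getD w 0
      = d.getD w 0 + (if x = w then 1 else 0) := by
  by_cases hx : d.contains x = false <;> by_cases hw : w = x <;>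
    simp [hx, hw, PySem.Dict.getD_modify, PySem.Dict.getD_insert,
      PySem.Dict.getD_of_not_contains] <;> exact fun h => hw h.symm

-- A's wordFreq loop computes the multiplicity of each word
lemma fwcFreq_getD (l : List String) (d : PySem.Dict String Int) (w : String) :
    (l.foldl (fun d word =>
      (if d.contains word = false then d.insert word 0 else d).modify word 0 (· + 1)) d).getD w 0
      = d.getD w 0 + (l.count w : Int) := by
  induction l generalizing d with
  | nil => simp
  | cons x t ih =>
    simp only [List.foldl_cons, ih, fwcStep_getD, List.count_cons]
    by_cases hw : x = w <;> simp [hw] <;> push_cast <;> ring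

lemma fwcFreq_contains (l : List String) (d : PySem.Dict String Int) (w : String) :
    (l.foldl (fun d word =>
      (if d.contains word = false then d.insert word 0 else d).modify word 0 (· + 1)) d).contains w
      = (d.contains w || l.contains w) := by
  induction l generalizing d with
  | nil => simp
  | cons x t ih =>
    simp only [List.foldl_cons, ih]
    by_cases hw : w = x
    · subst hw
      by_cases hx : d.contains w = false <;>
        simp [hx, PySem.Dict.contains_modify, PySem.Dict.contains_insert]
    · have hbx : (w == x) = false := by simpa using hw
      by_cases hx : d.contains x = false <;>
        simp [hx, hbx, hw, PySem.Dict.contains_modify, PySem.Dict.contains_insert]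

-- countwise ≤ plus equal lengths forces a permutation
lemma fwcPerm_of_count_le {α : Type} [DecidableEq α] {a b : List α}
    (hlen : a.length = b.length) (h : ∀ x, a.count x ≤ b.count x) : a.Perm b := by
  rw [← Multiset.coe_eq_coe]
  refine Multiset.eq_of_le_of_card_le (Multiset.le_iff_count.mpr ?_) (by simpa using hlen.ge)
  simpa using h

-- A's inner loop appends i exactly when the window is a permutation of words
lemma fwcInner_spec (str1 : String) (words : List String) (freq : PySem.Dict String Int)
    (hD : ∀ w, freq.getD w 0 = (words.count w : Int))
    (hC : ∀ w, freq.contains w = words.contains w)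
    (wl i : Int) :
    ∀ (r j : Nat) (seen : PySem.Dict String Int) (acc : List Int),
      j + r = words.length → 0 < r →
      (∀ w, seen.getD w 0 = (((fwcSlices str1 wl i words.length).take j).count w : Int)) →
      (∀ w, ((fwcSlices str1 wl i words.length).take j).count w ≤ words.count w) →
      fwcInner str1 freq (words.length : Int) wl i j r seen acc =
        if (fwcSlices str1 wl i words.length).Perm words then acc ++ [i] else acc := by
  intro r
  induction r with
  | zero => intro j seen acc hjk hr hseen hpre; omega
  | succ r ih =>
    intro j seen acc hjk hr hseen hpre
    have hj : j < words.length := by omega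
    have hSlen : (fwcSlices str1 wl i words.length).length = words.length := by
      simp [fwcSlices]
    have hjS : j < (fwcSlices str1 wl i words.length).length := by omega
    have hword : PySem.Str.slice str1 (some (i + (j : Int) * wl)) (some (i + (j : Int) * wl + wl))
        = (fwcSlices str1 wl i words.length)[j] := by
      simp only [fwcSlices]
      rw [List.getElem_map, List.getElem_range]
    have hmem : (fwcSlices str1 wl i words.length)[j] ∈ fwcSlices str1 wl i words.length :=
      List.getElem_mem hjS
    have htake : (fwcSlices str1 wl i words.length).take (j + 1)
        = (fwcSlices str1 wl i words.length).take j ++ [(fwcSlices str1 wl i words.length)[j]] := by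
      rw [List.take_add_one]
      simp [List.getElem?_eq_getElem hjS]
    have hcount1 : ∀ w, ((fwcSlices str1 wl i words.length).take (j + 1)).count w
        = ((fwcSlices str1 wl i words.length).take j).count w
          + (if (fwcSlices str1 wl i words.length)[j] = w then 1 else 0) := by
      intro w
      rw [htake, List.count_append]
      by_cases h : (fwcSlices str1 wl i words.length)[j] = w <;> simp [h]
    have hcountS : ∀ w, ((fwcSlices str1 wl i words.length).take (j + 1)).count w
        ≤ (fwcSlices str1 wl i words.length).count w := by
      intro w; exact (List.take_sublist _ _).count_le w
    simp only [fwcInner, hword]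
    by_cases hin : (fwcSlices str1 wl i words.length)[j] ∈ words
    case neg =>
      have hfc : freq.contains (fwcSlices str1 wl i words.length)[j] = false := by
        rw [hC]; simpa using hin
      have hnp : ¬ (fwcSlices str1 wl i words.length).Perm words := by
        intro hperm
        have h1 := hperm.count_eq (fwcSlices str1 wl i words.length)[j]
        have h2 : words.count (fwcSlices str1 wl i words.length)[j] = 0 :=
          List.count_eq_zero.mpr hin
        have h3 : 0 < (fwcSlices str1 wl i words.length).count (fwcSlices str1 wl i words.length)[j] :=
          List.count_pos_iff.mpr hmem
        omega
      rw [if_pos hfc, if_neg hnp]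
    case pos =>
      have hfcne : ¬ (freq.contains (fwcSlices str1 wl i words.length)[j] = false) := by
        rw [hC]; simpa using hin
      rw [if_neg hfcne]
      have hseen2 : ∀ w,
          ((if seen.contains (fwcSlices str1 wl i words.length)[j] = false
              then seen.insert (fwcSlices str1 wl i words.length)[j] 0 else seen).modify
              (fwcSlices str1 wl i words.length)[j] 0 (· + 1)).getD w 0
            = (((fwcSlices str1 wl i words.length).take (j + 1)).count w : Int) := by
        intro w
        rw [fwcStep_getD, hseen, hcount1]
        by_cases h : (fwcSlices str1 wl i words.length)[j] = w <;> simp [h]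
      by_cases hgt : words.count (fwcSlices str1 wl i words.length)[j]
          < ((fwcSlices str1 wl i words.length).take (j + 1)).count (fwcSlices str1 wl i words.length)[j]
      · have hgt' : ((if seen.contains (fwcSlices str1 wl i words.length)[j] = false
              then seen.insert (fwcSlices str1 wl i words.length)[j] 0 else seen).modify
              (fwcSlices str1 wl i words.length)[j] 0 (· + 1)).getD (fwcSlices str1 wl i words.length)[j] 0
            > freq.getD (fwcSlices str1 wl i words.length)[j] 0 := by
          rw [hseen2, hD]; exact_mod_cast hgt
        have hnp : ¬ (fwcSlices str1 wl i words.length).Perm words := by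
          intro hperm
          have h1 := hperm.count_eq (fwcSlices str1 wl i words.length)[j]
          have h2 := hcountS (fwcSlices str1 wl i words.length)[j]
          have h4 := hcount1 (fwcSlices str1 wl i words.length)[j]
          rw [if_pos rfl] at h4
          omega
        rw [if_pos hgt', if_neg hnp]
      · have hgtne : ¬ (((if seen.contains (fwcSlices str1 wl i words.length)[j] = false
              then seen.insert (fwcSlices str1 wl i words.length)[j] 0 else seen).modify
              (fwcSlices str1 wl i words.length)[j] 0 (· + 1)).getD (fwcSlices str1 wl i words.length)[j] 0
            > freq.getD (fwcSlices str1 wl i words.length)[j] 0) := by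
          rw [hseen2, hD]
          intro h
          exact hgt (by exact_mod_cast h)
        rw [if_neg hgtne]
        have hpre' : ∀ w, ((fwcSlices str1 wl i words.length).take (j + 1)).count w ≤ words.count w := by
          intro w
          rw [hcount1]
          by_cases h : (fwcSlices str1 wl i words.length)[j] = w
          · subst h
            rw [if_pos rfl]
            have h2 := hcountS (fwcSlices str1 wl i words.length)[j]
            have h3 := hcount1 (fwcSlices str1 wl i words.length)[j]
            rw [if_pos rfl] at h3
            omega
          · simpa [h] using hpre w
        cases r with
        | zero =>
          have hb : (((j : Int) + 1) == ((words.length : Nat) : Int)) = true := by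
            simp only [beq_iff_eq]; omega
          rw [if_pos hb]
          simp only [fwcInner]
          have hperm : (fwcSlices str1 wl i words.length).Perm words := by
            have htakeall : (fwcSlices str1 wl i words.length).take (j + 1)
                = fwcSlices str1 wl i words.length := by
              apply List.take_of_length_le; omega
            apply fwcPerm_of_count_le hSlen
            intro w
            have h2 := hpre' w
            rwa [htakeall] at h2
          rw [if_pos hperm]
        | succ r' =>
          have hbne : ¬ ((((j : Int) + 1) == ((words.length : Nat) : Int)) = true) := by
            simp only [beq_iff_eq]; omega
          rw [if_neg hbne]
          exact ih (j + 1) _ acc (by omega) (by omega) hseen2 hpre'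

-- B's slice list for one window is fwcSlices
lemma fwcWindow_eq (str1 : String) (wl i : Int) (k : Nat) :
    (PySem.List.pyRange 0 (k : Int) 1).map (fun j =>
        PySem.Str.slice str1 (some (i + j * wl)) (some (i + (j + 1) * wl)))
      = fwcSlices str1 wl i k := by
  rw [PySem.List.pyRange_one, List.map_map]
  simp only [fwcSlices, Int.sub_zero, Int.toNat_natCast]
  apply List.map_congr_left
  intro m _
  simp only [Function.comp_apply]
  congr 2
  · ring
  · ring

-- ===== VERDICT (by name: the statement is the Claim_ definition above) =====
theorem find_word_concatenation_spec : Claim_equal_find_word_concatenation := by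
  intro str1 words _dom
  unfold Spec_find_word_concatenation find_word_concatenation find_word_concatenation_alt
  by_cases hg : (words.length == 0 || PySem.Str.len (words.headD "") == 0) = true
  · rw [if_pos hg, if_pos hg]
  · rw [if_neg hg, if_neg hg]
    have hk : 0 < words.length := by
      rcases Nat.eq_zero_or_pos words.length with h | h
      · exact absurd (by simp [h]) hg
      · exact h
    apply PySem.List.foldl_congr_mem
    intro acc i _
    have hD : ∀ w, (words.foldl (fun d word =>
        (if d.contains word = false then d.insert word 0 else d).modify word 0 (· + 1))
        PySem.Dict.empty).getD w 0 = (words.count w : Int) := by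
      intro w; rw [fwcFreq_getD]; simp
    have hC : ∀ w, (words.foldl (fun (d : PySem.Dict String Int) word =>
        (if d.contains word = false then d.insert word 0 else d).modify word 0 (· + 1))
        PySem.Dict.empty).contains w = words.contains w := by
      intro w; rw [fwcFreq_contains]; simp
    rw [fwcInner_spec str1 words _ hD hC (PySem.Str.len (words.headD "")) i words.length 0
      PySem.Dict.empty acc (by omega) hk (by intro w; simp) (by intro w; simp)]
    rw [fwcWindow_eq str1 (PySem.Str.len (words.headD "")) i words.length]
    by_cases hp : (fwcSlices str1 (PySem.Str.len (words.headD "")) i words.length).Perm words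
    · have hs : PySem.List.sorted (fwcSlices str1 (PySem.Str.len (words.headD "")) i words.length)
          (fun x => x) false = PySem.List.sorted words (fun x => x) false :=
        (PySem.List.sorted_id_eq_sorted_id_iff_perm _ _).mpr hp
      have hb : (PySem.List.sorted (fwcSlices str1 (PySem.Str.len (words.headD "")) i words.length)
          (fun x => x) false == PySem.List.sorted words (fun x => x) false) = true := by
        rw [hs]; simp
      rw [if_pos hp, if_pos hb]
    · have hb : ¬ ((PySem.List.sorted (fwcSlices str1 (PySem.Str.len (words.headD "")) i words.length)
          (fun x => x) false == PySem.List.sorted words (fun x => x) false) = true) := by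
        simp only [beq_iff_eq]
        intro h
        exact hp ((PySem.List.sorted_id_eq_sorted_id_iff_perm _ _).mp h)
      rw [if_neg hp, if_neg hb]
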